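-- pv_equiv track=rewrite | github.com/SamuelEllertson/kata | last_digit.py | clean_arr
-- ===== SOURCE A (Python) =====
-- def clean_arr(arr):
--     if len(arr) == 0:
--         return None, 1
--     elif arr[0] == 1:
--         return None, 1
--
--     no_ones = []
--     no_ones.append(arr[0] % 10)
--
--     #first pass: get everything until first 1 (not including), everything after is irrelevant
--     for exp in arr[1:]:
--         if exp == 1:
--             break
--         no_ones.append(exp)
--
--     #only 1 element -> done cleaning
--     if len(no_ones) == 1:
--         return no_ones, None
--
--     #otherwise we now handle 0's
--
--     clean = []
--
--     #Phase 1: trim everything after first string of 0's, they are irrelevant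
--     found_zero = False
--     for value in no_ones:
--         if not found_zero and value != 0:
--             clean.append(value)
--         elif not found_zero and value == 0:
--             clean.append(value)
--             found_zero = True
--         elif found_zero and value == 0:
--             clean.append(value)
--         elif found_zero and value != 0:
--             break
--
--     #Phase 2: evaluate any 0's at end of list
--     while len(clean) > 1:
--         right = clean.pop()
--         left = clean.pop()
--
--         if left == 0 and right == 0:
--             clean.append(1)
--         elif left != 0 and right == 0:
--             clean.append(1)
--         elif left == 0 and right != 0:
--             clean.append(0)
--         elif left != 0 and right != 0:
--             clean.append(left)
--             clean.append(right)
--             break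
--
--     #Phase 3: Remove any 1's at the end
--     while len(clean) > 1 and clean[-1] == 1:
--         clean.pop()
--
--     #if only 1 value left, thats our answer % 10
--     if len(clean) == 1:
--         return None, clean[0] % 10
--
--     return clean, None
-- ===== SOURCE B (Python) =====
-- def clean_arr(arr):
--     if len(arr) == 0 or arr[0] == 1:
--         return None, 1
--
--     # relevant prefix: arr[0] % 10 followed by raw values up to (excluding) first 1
--     no_ones = [arr[0] % 10]
--     for exp in arr[1:]:
--         if exp == 1:
--             break
--         no_ones.append(exp)
--
--     if len(no_ones) == 1:
--         return no_ones, None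
--
--     # m = length of the leading nonzero run, k = length of the zero run after it
--     m = 0
--     while m < len(no_ones) and no_ones[m] != 0:
--         m += 1
--     k = 0
--     while m + k < len(no_ones) and no_ones[m + k] == 0:
--         k += 1
--
--     if k == 0:
--         return no_ones, None
--     if m == 0 and k % 2 == 1:
--         return None, 0
--
--     # an even zero run collapses to x**(0**0)**... = the base itself, an odd run
--     # additionally kills the base (x**0 == 1), which is then stripped
--     result = no_ones[:m] if k % 2 == 0 else no_ones[:m - 1]
--
--     if len(result) == 0:
--         return None, 1
--     if len(result) == 1:
--         return None, result[0] % 10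
--     return result, None
-- ===== Notes on version B (the rewrite author's own statement) =====
-- stated objective: simpler
-- what changed: Phase 1-3 (the zero-run trim, the pop/push stack-collapse while-loop and the trailing-1 stripping) are replaced by a direct computation: B measures the leading nonzero run m and the following zero run k and derives the answer arithmetically from the parity of k, with no list mutation at all.
import Mathlib
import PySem

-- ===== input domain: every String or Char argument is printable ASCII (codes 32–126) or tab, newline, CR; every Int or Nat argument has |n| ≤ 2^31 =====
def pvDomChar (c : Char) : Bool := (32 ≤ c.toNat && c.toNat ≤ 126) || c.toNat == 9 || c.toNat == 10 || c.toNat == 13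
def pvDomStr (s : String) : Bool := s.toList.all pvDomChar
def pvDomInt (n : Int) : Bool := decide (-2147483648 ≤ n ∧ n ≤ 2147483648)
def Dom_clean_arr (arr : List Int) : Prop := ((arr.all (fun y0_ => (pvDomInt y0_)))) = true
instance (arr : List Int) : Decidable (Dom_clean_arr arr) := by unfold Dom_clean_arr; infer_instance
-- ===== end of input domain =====

-- B replaces A's three mutation phases (zero-run trim, pop/push stack collapse, trailing-1
-- stripping) by a direct dispatch on the leading nonzero-run length m and zero-run length k
-- (objective: simpler, no list mutation).

-- ===== PORT A =====
-- first pass: everything until (excluding) the first 1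
def pvTakeUntilOne : List Int → List Int
  | [] => []
  | e :: r => if e == 1 then [] else e :: pvTakeUntilOne r

-- Phase 1 loop with its found_zero flag, branches in A's order
def pvPhase1 : List Int → Bool → List Int
  | [], _ => []
  | v :: rest, false =>
      if v ≠ 0 then v :: pvPhase1 rest false
      else v :: pvPhase1 rest true
  | v :: rest, true =>
      if v == 0 then v :: pvPhase1 rest true
      else []

-- Phase 2 while-loop; the list is processed REVERSED (head = Python's list end, so the
-- two pops and the appends become head operations); branches in A's order
def pvPhase2 : List Int → List Int
  | r :: l :: rest =>
      if l == 0 && r == 0 then pvPhase2 (1 :: rest)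
      else if l ≠ 0 && r == 0 then pvPhase2 (1 :: rest)
      else if l == 0 && r ≠ 0 then pvPhase2 (0 :: rest)
      else r :: l :: rest
  | xs => xs
  termination_by xs => xs.length
  decreasing_by all_goals simp

-- Phase 3 while-loop, also on the reversed list (strip 1s at Python's end while len > 1)
def pvPhase3 : List Int → List Int
  | x :: y :: rest => if x == 1 then pvPhase3 (y :: rest) else x :: y :: rest
  | xs => xs

def clean_arr (arr : List Int) : Option (List Int) × Option Int :=
  match arr with
  | [] => (none, some 1)
  | a0 :: rest =>
    if a0 == 1 then (none, some 1)
    else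
      let no_ones := PySem.Int.mod a0 10 :: pvTakeUntilOne rest
      if no_ones.length == 1 then (some no_ones, none)
      else
        let clean := pvPhase1 no_ones false
        let clean3 := (pvPhase3 (pvPhase2 clean.reverse)).reverse
        -- clean[0] is guarded by len == 1, so headD is exact here
        if clean3.length == 1 then (none, some (PySem.Int.mod (clean3.headD 0) 10))
        else (some clean3, none)

-- ===== PORT B =====
def pvUntilOne : List Int → List Int
  | [] => []
  | e :: r => if e == 1 then [] else e :: pvUntilOne r

-- B's first while loop: length of the leading nonzero run
def pvNzLen : List Int → Nat
  | [] => 0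
  | x :: r => if x ≠ 0 then 1 + pvNzLen r else 0

-- B's second while loop: length of the leading zero run
def pvZLen : List Int → Nat
  | [] => 0
  | x :: r => if x == 0 then 1 + pvZLen r else 0

def clean_arr_alt (arr : List Int) : Option (List Int) × Option Int :=
  match arr with
  | [] => (none, some 1)
  | a0 :: rest =>
    if a0 == 1 then (none, some 1)
    else
      let no_ones := PySem.Int.mod a0 10 :: pvUntilOne rest
      if no_ones.length == 1 then (some no_ones, none)
      else
        let m := pvNzLen no_ones
        let k := pvZLen (no_ones.drop m)
        if k == 0 then (some no_ones, none)
        else if m == 0 && k % 2 == 1 then (none, some 0)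
        else
          let result := if k % 2 == 0 then no_ones.take m else no_ones.take (m - 1)
          if result.length == 0 then (none, some 1)
          -- result[0] is guarded by len == 1, so headD is exact here
          else if result.length == 1 then (none, some (PySem.Int.mod (result.headD 0) 10))
          else (some result, none)

-- ===== PRECONDITION & SPEC =====
def Spec_clean_arr (arr : List Int) (out : Option (List Int) × Option Int) : Prop := out = clean_arr_alt arr
instance (arr : List Int) (out : Option (List Int) × Option Int) : Decidable (Spec_clean_arr arr out) := by unfold Spec_clean_arr; infer_instance

-- ===== CLAIM (what is proved, stated in full; the proofs are below) =====
def Claim_equal_clean_arr : Prop := ∀ (arr : List Int), Dom_clean_arr arr → Spec_clean_arr arr (clean_arr arr)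

-- ===== LEMMAS AND PROOFS =====

theorem takeUntil_eq (t : List Int) : pvTakeUntilOne t = pvUntilOne t := by
  induction t with
  | nil => rfl
  | cons e r ih => simp [pvTakeUntilOne, pvUntilOne, ih]

theorem untilOne_ne_one (t : List Int) : ∀ x ∈ pvUntilOne t, x ≠ 1 := by
  induction t with
  | nil => simp [pvUntilOne]
  | cons e r ih =>
      intro x hx
      by_cases he : e = 1
      · simp [pvUntilOne, he] at hx
      · simp [pvUntilOne, he] at hx
        rcases hx with h | h
        · simpa [h] using he
        · exact ih x h

theorem nzLen_le (xs : List Int) : pvNzLen xs ≤ xs.length := by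
  induction xs with
  | nil => simp [pvNzLen]
  | cons x r ih =>
      by_cases h : x = 0
      · simp [pvNzLen, h]
      · simp [pvNzLen, h]; omega

theorem take_nzLen_ne_zero (xs : List Int) : ∀ x ∈ xs.take (pvNzLen xs), x ≠ 0 := by
  induction xs with
  | nil => simp
  | cons x r ih =>
      by_cases h : x = 0
      · simp [pvNzLen, h]
      · rw [pvNzLen]
        simp only [h, if_true, ne_eq, not_false_eq_true, Nat.add_comm 1 (pvNzLen r),
          List.take_succ_cons]
        intro y hy
        rcases List.mem_cons.mp hy with h' | h'
        · simpa [h'] using h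
        · exact ih y h'

theorem drop_nzLen_shape (xs : List Int) :
    xs.drop (pvNzLen xs) = [] ∨ ∃ t, xs.drop (pvNzLen xs) = 0 :: t := by
  induction xs with
  | nil => left; simp
  | cons x r ih =>
      by_cases h : x = 0
      · right; exact ⟨r, by simp [pvNzLen, h]⟩
      · simpa [pvNzLen, h, Nat.add_comm 1 (pvNzLen r)] using ih

theorem phase1_true (xs : List Int) : pvPhase1 xs true = List.replicate (pvZLen xs) 0 := by
  induction xs with
  | nil => rfl
  | cons x r ih =>
      by_cases h : x = 0
      · simp [pvPhase1, pvZLen, h, Nat.add_comm 1 (pvZLen r), List.replicate_succ, ih]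
      · simp [pvPhase1, pvZLen, h]

theorem phase1_eq (xs : List Int) :
    pvPhase1 xs false = xs.take (pvNzLen xs) ++ List.replicate (pvZLen (xs.drop (pvNzLen xs))) 0 := by
  induction xs with
  | nil => rfl
  | cons x r ih =>
      by_cases h : x = 0
      · simp [pvPhase1, pvNzLen, h, phase1_true, pvZLen, Nat.add_comm 1 (pvZLen r),
          List.replicate_succ]
      · simp [pvPhase1, pvNzLen, h, Nat.add_comm 1 (pvNzLen r), ih]

theorem p2_step (k : Nat) (t : List Int) :
    pvPhase2 (List.replicate (k + 3) 0 ++ t) = pvPhase2 (List.replicate (k + 1) 0 ++ t) := by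
  have e1 : List.replicate (k + 3) (0 : Int) ++ t = 0 :: 0 :: 0 :: (List.replicate k 0 ++ t) := by
    rw [show k + 3 = k + 1 + 1 + 1 by omega]
    simp [List.replicate_succ]
  have e2 : List.replicate (k + 1) (0 : Int) ++ t = 0 :: (List.replicate k 0 ++ t) := by
    simp [List.replicate_succ]
  rw [e1, e2]
  rw [pvPhase2]
  norm_num
  rw [pvPhase2]
  norm_num

theorem p2_odd (j : Nat) (t : List Int) :
    pvPhase2 (List.replicate (2 * j + 1) 0 ++ t) = pvPhase2 (0 :: t) := by
  induction j with
  | zero => simp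
  | succ n ih =>
      have h := p2_step (2 * n) t
      rw [show 2 * (n + 1) + 1 = 2 * n + 3 by omega]
      rw [h]
      exact ih

theorem p2_even (j : Nat) (t : List Int) :
    pvPhase2 (List.replicate (2 * j + 2) 0 ++ t) = pvPhase2 (0 :: 0 :: t) := by
  induction j with
  | zero =>
      rw [show 2 * 0 + 2 = 1 + 1 by omega]
      simp [List.replicate_succ]
  | succ n ih =>
      have h := p2_step (2 * n + 1) t
      rw [show 2 * (n + 1) + 2 = 2 * n + 1 + 3 by omega]
      rw [h]
      rw [show 2 * n + 1 + 1 = 2 * n + 2 by omega]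
      exact ih


theorem p2_sing (x : Int) : pvPhase2 [x] = [x] := by
  rw [pvPhase2]
  intro r l rest h
  simp at h

theorem p2_nonzero (r s : Int) (rest : List Int) (hr : r ≠ 0) (hs : s ≠ 0) :
    pvPhase2 (r :: s :: rest) = r :: s :: rest := by
  rw [pvPhase2]; simp [hr, hs]

theorem p3_sing (x : Int) : pvPhase3 [x] = [x] := rfl

theorem p3_one (y : Int) (rest : List Int) : pvPhase3 (1 :: y :: rest) = pvPhase3 (y :: rest) := by
  rw [pvPhase3]; simp

theorem p3_ne_one (x y : Int) (rest : List Int) (hx : x ≠ 1) :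
    pvPhase3 (x :: y :: rest) = x :: y :: rest := by
  rw [pvPhase3]; simp [hx]

theorem mem_tail_append (l l2 : List Int) (e : Int) (hl : l ≠ []) (he : e ∈ l2) :
    e ∈ (l ++ l2).tail := by
  cases l with
  | nil => exact absurd rfl hl
  | cons c cs => simpa using Or.inr he

theorem core (xs : List Int) (hlen : 2 ≤ xs.length) (ht1 : ∀ x ∈ xs.tail, x ≠ 1) :
    (let clean := pvPhase1 xs false
     let clean3 := (pvPhase3 (pvPhase2 clean.reverse)).reverse
     if clean3.length == 1 then ((none : Option (List Int)), some (PySem.Int.mod (clean3.headD 0) 10))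
     else (some clean3, (none : Option Int)))
    =
    (let m := pvNzLen xs
     let k := pvZLen (xs.drop m)
     if k == 0 then (some xs, none)
     else if m == 0 && k % 2 == 1 then (none, some 0)
     else
       let result := if k % 2 == 0 then xs.take m else xs.take (m - 1)
       if result.length == 0 then (none, some 1)
       else if result.length == 1 then (none, some (PySem.Int.mod (result.headD 0) 10))
       else (some result, none)) := by
  simp only []
  have hmle := nzLen_le xs
  have hP := take_nzLen_ne_zero xs
  have hPlen : (xs.take (pvNzLen xs)).length = pvNzLen xs := by
    simp [List.length_take]; omega
  have hclean : pvPhase1 xs false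
      = xs.take (pvNzLen xs) ++ List.replicate (pvZLen (xs.drop (pvNzLen xs))) 0 := phase1_eq xs
  by_cases hk0 : pvZLen (xs.drop (pvNzLen xs)) = 0
  · -- k = 0 : the drop is empty, clean = xs, phases leave it alone
    have hdrop : xs.drop (pvNzLen xs) = [] := by
      rcases drop_nzLen_shape xs with h | ⟨t, h⟩
      · exact h
      · rw [h] at hk0; simp [pvZLen] at hk0
    have hmlen : pvNzLen xs = xs.length := by
      have := congrArg List.length hdrop
      simp at this; omega
    have htake : xs.take (pvNzLen xs) = xs := by
      rw [hmlen]; simp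
    have hcx : pvPhase1 xs false = xs := by rw [hclean, hk0, htake]; simp
    have hxs0 : ∀ x ∈ xs, x ≠ 0 := by rw [htake] at hP; exact hP
    obtain ⟨x0, b, u, hx⟩ : ∃ x0 b u, xs = x0 :: b :: u := by
      match xs, hlen with
      | x0 :: b :: u, _ => exact ⟨x0, b, u, rfl⟩
    obtain ⟨r, w, hur⟩ : ∃ r w, (b :: u).reverse = r :: w := by
      match h' : (b :: u).reverse with
      | [] => exact absurd (congrArg List.length h') (by simp)
      | r :: w => exact ⟨r, w, rfl⟩
    have hrev : xs.reverse = r :: (w ++ [x0]) := by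
      have : xs.reverse = (b :: u).reverse ++ [x0] := by rw [hx]; simp
      rw [this, hur]; simp
    have hrbu : r ∈ (b :: u) := by
      have : r ∈ (b :: u).reverse := by rw [hur]; exact List.mem_cons_self ..
      exact List.mem_reverse.mp this
    have hrmem : r ∈ xs := by rw [hx]; exact List.mem_cons_of_mem _ hrbu
    have hr0 : r ≠ 0 := hxs0 r hrmem
    have hr1 : r ≠ 1 := by
      apply ht1; rw [hx]; exact hrbu
    obtain ⟨s, rest, hws⟩ : ∃ s rest, w ++ [x0] = s :: rest := by
      match w with
      | [] => exact ⟨x0, [], rfl⟩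
      | c :: cs => exact ⟨c, cs ++ [x0], rfl⟩
    have hsmem : s ∈ xs := by
      have : s ∈ xs.reverse := by rw [hrev, hws]; right; exact List.mem_cons_self ..
      simpa using this
    have hs0 : s ≠ 0 := hxs0 s hsmem
    have h2 : pvPhase2 xs.reverse = xs.reverse := by
      rw [hrev, hws, pvPhase2]
      simp [hr0, hs0]
    have h3 : pvPhase3 xs.reverse = xs.reverse := by
      rw [hrev, hws, pvPhase3]
      simp [hr1]
    rw [hcx, h2, h3]
    simp only [List.reverse_reverse, hk0]
    have : ¬ (xs.length == 1) = true := by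
      simp; omega
    simp [this]
  · -- k ≥ 1
    have hrevc : (pvPhase1 xs false).reverse
        = List.replicate (pvZLen (xs.drop (pvNzLen xs))) 0 ++ (xs.take (pvNzLen xs)).reverse := by
      rw [hclean]; simp [List.reverse_append]
    generalize hkg : pvZLen (xs.drop (pvNzLen xs)) = k at hk0 hrevc ⊢
    generalize hmg : pvNzLen xs = m at hmle hP hPlen hrevc ⊢
    cases hQc : (xs.take m).reverse with
    | nil =>
      have hm0 : m = 0 := by
        have hl := congrArg List.length hQc
        simp only [List.length_reverse, hPlen] at hl
        simpa using hl
      subst hm0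
      rcases Nat.even_or_odd k with hpar | hpar
      · obtain ⟨j, hj⟩ : ∃ j, k = 2 * j + 2 := by
          rcases hpar with ⟨r, hr⟩; exact ⟨r - 1, by omega⟩
        subst hj
        have hfin : pvPhase3 (pvPhase2 (pvPhase1 xs false).reverse) = [1] := by
          rw [hrevc, hQc, List.append_nil]
          have h := p2_even j []
          rw [List.append_nil] at h
          rw [h, pvPhase2]
          norm_num
          rw [p2_sing]
          exact p3_sing 1
        rw [hfin]
        have c1 : 2 * j + 2 ≠ 0 := by omega
        have c2 : (2 * j + 2) % 2 = 0 := by omega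
        have c3 : PySem.Int.mod (1 : Int) 10 = 1 := by decide
        simp [c2]
      · obtain ⟨j, hj⟩ := hpar
        subst hj
        have hfin : pvPhase3 (pvPhase2 (pvPhase1 xs false).reverse) = [0] := by
          rw [hrevc, hQc, List.append_nil]
          have h := p2_odd j []
          rw [List.append_nil] at h
          rw [h, p2_sing]
          exact p3_sing 0
        rw [hfin]
        have c2 : (2 * j + 1) % 2 = 1 := by omega
        have c3 : PySem.Int.mod (0 : Int) 10 = 0 := by decide
        simp [c2]
    | cons p Q' =>
      have hPeq : xs.take m = Q'.reverse ++ [p] := by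
        rw [← List.reverse_reverse (xs.take m), hQc]; simp
      have hp0 : p ≠ 0 := hP p (by rw [← List.mem_reverse, hQc]; exact List.mem_cons_self ..)
      have hmQ : m = Q'.length + 1 := by
        have hl := congrArg List.length hQc
        simp only [List.length_reverse, hPlen, List.length_cons] at hl
        omega
      subst hmQ
      obtain ⟨x0, t, hx⟩ : ∃ x0 t, xs = x0 :: t := by
        match xs, hlen with
        | x0 :: t, _ => exact ⟨x0, t, rfl⟩
      have htailP : t.take Q'.length = (Q'.reverse ++ [p]).tail := by
        have h1 : xs.take (Q'.length + 1) = x0 :: t.take Q'.length := by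
          rw [hx]; simp
        exact congrArg List.tail (h1.symm.trans hPeq)
      have hresodd : xs.take (Q'.length + 1 - 1) = Q'.reverse := by
        have h1 : xs.take (Q'.length + 1 - 1) = (xs.take (Q'.length + 1)).take (Q'.length + 1 - 1) := by
          rw [List.take_take]; congr 1; omega
        have h2 : Q'.length + 1 - 1 = Q'.reverse.length := by simp
        rw [h1, hPeq, h2, List.take_left]
      rcases Nat.even_or_odd k with hpar | hpar
      · obtain ⟨j, hj⟩ : ∃ j, k = 2 * j + 2 := by
          rcases hpar with ⟨r, hr⟩; exact ⟨r - 1, by omega⟩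
        subst hj
        have h2a : pvPhase2 (pvPhase1 xs false).reverse = 1 :: p :: Q' := by
          rw [hrevc, hQc, p2_even, pvPhase2]
          norm_num
          rw [p2_nonzero 1 p Q' (by norm_num) hp0]
        have c1 : 2 * j + 2 ≠ 0 := by omega
        have c2 : (2 * j + 2) % 2 = 0 := by omega
        cases Q' with
        | nil =>
          have hfin : pvPhase3 (pvPhase2 (pvPhase1 xs false).reverse) = [p] := by
            rw [h2a, p3_one]
            exact p3_sing p
          rw [hfin]
          have hres : xs.take ([] : List Int).length.succ = [p] := by simpa using hPeq
          simp only [List.length_nil, Nat.succ_eq_add_one, Nat.zero_add] at hres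
          simp [c2, hres]
        | cons q Q'' =>
          have hp1 : p ≠ 1 := by
            have hmem : p ∈ t.take (q :: Q'').length := by
              rw [htailP]
              exact mem_tail_append _ _ _ (by simp) (by simp)
            exact ht1 _ (by rw [hx]; exact List.mem_of_mem_take hmem)
          have hfin : pvPhase3 (pvPhase2 (pvPhase1 xs false).reverse) = p :: q :: Q'' := by
            rw [h2a, p3_one, p3_ne_one _ _ _ hp1]
          rw [hfin]
          have hrev3 : (p :: q :: Q'').reverse = xs.take ((q :: Q'').length + 1) := by
            rw [← hQc, List.reverse_reverse]
          rw [hrev3]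
          have hne : xs ≠ [] := by
            intro h; rw [h] at hlen; simp at hlen
          simp [c2, hne]
      · obtain ⟨j, hj⟩ := hpar
        subst hj
        have h2a : pvPhase2 (pvPhase1 xs false).reverse = pvPhase2 (1 :: Q') := by
          rw [hrevc, hQc, p2_odd, pvPhase2]
          simp [hp0]
        have c2 : (2 * j + 1) % 2 = 1 := by omega
        cases Q' with
        | nil =>
          have hfin : pvPhase3 (pvPhase2 (pvPhase1 xs false).reverse) = [1] := by
            rw [h2a, p2_sing]
            exact p3_sing 1
          rw [hfin]
          have c3 : PySem.Int.mod (1 : Int) 10 = 1 := by decide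
          simp [c2]
        | cons q Q'' =>
          have hq0 : q ≠ 0 := by
            refine hP q ?_
            rw [← List.mem_reverse, hQc]
            exact List.mem_cons_of_mem _ (List.mem_cons_self ..)
          have h2b : pvPhase2 (1 :: q :: Q'') = 1 :: q :: Q'' :=
            p2_nonzero 1 q Q'' (by norm_num) hq0
          cases Q'' with
          | nil =>
            have hfin : pvPhase3 (pvPhase2 (pvPhase1 xs false).reverse) = [q] := by
              rw [h2a, h2b, p3_one]
              exact p3_sing q
            rw [hfin]
            have hres : xs.take 1 = [q] := by simpa using hresodd
            simp [c2, hres]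
          | cons d ds =>
            have hq1 : q ≠ 1 := by
              have e : (q :: d :: ds).reverse ++ [p] = (d :: ds).reverse ++ [q, p] := by
                simp
              have hmem : q ∈ t.take (q :: d :: ds).length := by
                rw [htailP, e]
                exact mem_tail_append _ _ _ (by simp) (by simp)
              exact ht1 _ (by rw [hx]; exact List.mem_of_mem_take hmem)
            have hfin : pvPhase3 (pvPhase2 (pvPhase1 xs false).reverse) = q :: d :: ds := by
              rw [h2a, h2b, p3_one, p3_ne_one _ _ _ hq1]
            rw [hfin]
            rw [show (q :: d :: ds).reverse = xs.take ((q :: d :: ds : List Int).length + 1 - 1) from hresodd.symm]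
            have hlen3 : (xs.take ((q :: d :: ds : List Int).length + 1 - 1)).length = ds.length + 2 := by
              rw [hresodd]; simp
            have hne : xs ≠ [] := by
              intro h; rw [h] at hlen; simp at hlen
            simp [c2, hne]

-- ===== VERDICT (by name: the statement is the Claim_ definition above) =====
theorem clean_arr_spec : Claim_equal_clean_arr := by
  intro arr _
  unfold Spec_clean_arr
  cases arr with
  | nil => rfl
  | cons a0 rest =>
    show clean_arr (a0 :: rest) = clean_arr_alt (a0 :: rest)
    unfold clean_arr clean_arr_alt
    by_cases h1 : a0 = 1
    · simp [h1]
    · have h1' : (a0 == 1) = false := by simpa using h1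
      simp only [h1', Bool.false_eq_true, if_false, takeUntil_eq]
      cases hu : pvUntilOne rest with
      | nil => simp
      | cons b u =>
        have hlen2 : ((PySem.Int.mod a0 10 :: b :: u).length == 1) = false := by simp
        simp only [hlen2, Bool.false_eq_true, if_false]
        exact core (PySem.Int.mod a0 10 :: b :: u) (by simp)
          (by
            intro x hx
            exact untilOne_ne_one rest x (by rw [hu]; exact hx))
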